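-- pv_equiv track=rewrite | github.com/achilleas-k/osbuild-devel | tools/updaterepos.py | filter_newest
-- ===== SOURCE A (Python) =====
-- def filter_newest(repos):
--     """
--     For each distro, arch, and repo name, return just the newest one.
--     """
--     repo_map: dict[str, list] = {}
--
--     # collect all repos that have the same name (without date)
--     for repo in repos:
--         if "beta" in repo:
--             # skip beta repos
--             continue
--         repo_date = repo.split("-")[-1]
--         if len(repo_date) > 8:
--             # some older snapshots include more than date: ignore them
--             continue
--         reponame = repo[:-8]
--         repo_group = repo_map.get(reponame, [])
--         repo_group.append(repo)
--         repo_map[reponame] = repo_group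
--
--     newest = []
--     for repo_group in repo_map.values():
--         newest.append(sorted(repo_group)[-1])
--
--     return newest
-- ===== SOURCE B (Python) =====
-- def filter_newest(repos):
--     """
--     For each distro, arch, and repo name, return just the newest one.
--     """
--     # single pass: map reponame -> newest repo string seen so far
--     newest_map: dict[str, str] = {}
--     for repo in repos:
--         if "beta" in repo:
--             # skip beta repos
--             continue
--         if len(repo.split("-")[-1]) > 8:
--             # some older snapshots include more than date: ignore them
--             continue
--         reponame = repo[:-8]
--         prev = newest_map.get(reponame, repo)
--         newest_map[reponame] = prev if prev >= repo else repo
--     return list(newest_map.values())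
-- ===== Notes on version B (the rewrite author's own statement) =====
-- stated objective: faster
-- what changed: Instead of collecting a per-name list of repos and then running a second loop that sorts each group to pick its last element, B keeps a single scalar running maximum per name in one pass over the input and returns the dict's values directly.
import Mathlib
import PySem

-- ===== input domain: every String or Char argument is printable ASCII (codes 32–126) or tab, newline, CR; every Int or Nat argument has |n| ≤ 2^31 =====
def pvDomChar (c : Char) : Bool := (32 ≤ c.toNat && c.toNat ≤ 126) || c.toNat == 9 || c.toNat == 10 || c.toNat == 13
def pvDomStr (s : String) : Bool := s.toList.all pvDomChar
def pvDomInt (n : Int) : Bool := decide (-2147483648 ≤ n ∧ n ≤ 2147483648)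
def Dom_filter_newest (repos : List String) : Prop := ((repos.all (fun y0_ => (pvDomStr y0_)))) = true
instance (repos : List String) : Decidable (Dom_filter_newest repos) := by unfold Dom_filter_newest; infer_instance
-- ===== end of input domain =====

-- B replaces A's collect-groups-then-sort-each-group scheme by a single pass keeping one
-- scalar running maximum per repo name (objective: faster — no group lists, no sorting).

-- ===== PORT A =====
def filter_newest (repos : List String) : List String :=
  let repo_map : PySem.Dict String (List String) :=
    repos.foldl (fun d repo =>
      if PySem.Str.isIn "beta" repo then d
      else
        let repo_date := PySem.List.pyGetD ((PySem.Str.split? repo "-").getD []) (-1) ""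
        if 8 < PySem.Str.len repo_date then d
        else
          let reponame := PySem.Str.slice repo none (some (-8))
          let repo_group := d.getD reponame []
          d.insert reponame (repo_group ++ [repo])) PySem.Dict.empty
  repo_map.values.foldl (fun newest repo_group =>
    newest ++ [PySem.List.pyGetD (PySem.List.sorted repo_group (fun x => x) false) (-1) ""]) []

-- ===== PORT B =====
def filter_newest_alt (repos : List String) : List String :=
  let newest_map : PySem.Dict String String :=
    repos.foldl (fun d repo =>
      if PySem.Str.isIn "beta" repo then d
      else if 8 < PySem.Str.len (PySem.List.pyGetD ((PySem.Str.split? repo "-").getD []) (-1) "") then d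
      else
        let reponame := PySem.Str.slice repo none (some (-8))
        let prev := d.getD reponame repo
        d.insert reponame (if repo ≤ prev then prev else repo)) PySem.Dict.empty
  newest_map.values

-- ===== PRECONDITION & SPEC =====
def Spec_filter_newest (repos : List String) (out : List String) : Prop := out = filter_newest_alt repos
instance (repos : List String) (out : List String) : Decidable (Spec_filter_newest repos out) := by unfold Spec_filter_newest; infer_instance

-- ===== CLAIM (what is proved, stated in full; the proofs are below) =====
def Claim_equal_filter_newest : Prop := ∀ (repos : List String), Dom_filter_newest repos → Spec_filter_newest repos (filter_newest repos)

-- ===== LEMMAS AND PROOFS =====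

-- the common guard and key of both loops
def pvKeep (r : String) : Bool :=
  !PySem.Str.isIn "beta" r &&
  !decide (8 < PySem.Str.len (PySem.List.pyGetD ((PySem.Str.split? r "-").getD []) (-1) ""))

def pvKey (r : String) : String := PySem.Str.slice r none (some (-8))

def pvStepA (d : PySem.Dict String (List String)) (r : String) : PySem.Dict String (List String) :=
  d.insert (pvKey r) (d.getD (pvKey r) [] ++ [r])

def pvStepB (d : PySem.Dict String String) (r : String) : PySem.Dict String String :=
  d.insert (pvKey r) (if r ≤ d.getD (pvKey r) r then d.getD (pvKey r) r else r)

-- A's loop body is 'if pvKeep then pvStepA else skip'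
lemma pvFoldA (l : List String) (d : PySem.Dict String (List String)) :
    l.foldl (fun d repo =>
      if PySem.Str.isIn "beta" repo then d
      else
        if 8 < PySem.Str.len (PySem.List.pyGetD ((PySem.Str.split? repo "-").getD []) (-1) "") then d
        else d.insert (PySem.Str.slice repo none (some (-8)))
               (d.getD (PySem.Str.slice repo none (some (-8))) [] ++ [repo])) d
    = (l.filter pvKeep).foldl pvStepA d := by
  rw [← PySem.List.foldl_if_eq_foldl_filter]
  apply PySem.List.foldl_congr_mem
  intro acc x _
  simp only [pvKeep, pvStepA, pvKey]
  split_ifs <;> simp_all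

lemma pvFoldB (l : List String) (d : PySem.Dict String String) :
    l.foldl (fun d repo =>
      if PySem.Str.isIn "beta" repo then d
      else if 8 < PySem.Str.len (PySem.List.pyGetD ((PySem.Str.split? repo "-").getD []) (-1) "") then d
      else d.insert (PySem.Str.slice repo none (some (-8)))
             (if repo ≤ d.getD (PySem.Str.slice repo none (some (-8))) repo
              then d.getD (PySem.Str.slice repo none (some (-8))) repo else repo)) d
    = (l.filter pvKeep).foldl pvStepB d := by
  rw [← PySem.List.foldl_if_eq_foldl_filter]
  apply PySem.List.foldl_congr_mem
  intro acc x _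
  simp only [pvKeep, pvStepB, pvKey]
  split_ifs <;> simp_all

-- A's dict holds, at key k, exactly the kept repos whose name is k (in order)
lemma pvA_getD (l : List String) (k : String) :
    ∀ d : PySem.Dict String (List String),
      (l.foldl pvStepA d).getD k [] = d.getD k [] ++ l.filter (fun r => pvKey r == k) := by
  induction l with
  | nil => simp
  | cons r l ih =>
    intro d
    simp only [List.foldl_cons, List.filter_cons]
    by_cases h : pvKey r = k
    · subst h
      simp [ih, pvStepA, PySem.Dict.getD_insert_self]
    · have hb : (pvKey r == k) = false := by simpa using h
      rw [ih]
      show (pvStepA d r).getD k [] ++ _ = _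
      rw [pvStepA, PySem.Dict.getD_insert_of_ne _ _ _ (Ne.symm h)]
      simp [hb]

-- the running-maximum fold, threaded through an Option accumulator as B's get does
def pvOmax (o : Option String) : List String → Option String
  | [] => o
  | x :: xs => pvOmax (some (if x ≤ o.getD x then o.getD x else x)) xs

lemma pvB_get? (l : List String) (k : String) :
    ∀ d : PySem.Dict String String,
      (l.foldl pvStepB d).get? k = pvOmax (d.get? k) (l.filter (fun r => pvKey r == k)) := by
  induction l with
  | nil => simp [pvOmax]
  | cons r l ih =>
    intro d
    simp only [List.foldl_cons, List.filter_cons]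
    by_cases h : pvKey r = k
    · subst h
      simp [ih, pvStepB, PySem.Dict.get?_insert_self, pvOmax, PySem.Dict.getD_eq_get?_getD]
    · have : (pvKey r == k) = false := by simpa using h
      simp [ih, pvStepB, this, PySem.Dict.get?_insert_of_ne _ _ (Ne.symm h)]

lemma pvOmax_some (xs : List String) :
    ∀ c, pvOmax (some c) xs = some (xs.foldl (fun c r => if r ≤ c then c else r) c) := by
  induction xs with
  | nil => intro c; simp [pvOmax]
  | cons x xs ih => intro c; simp [pvOmax, ih]

lemma pvStep_eq_max (c r : String) : (if r ≤ c then c else r) = max c r := by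
  by_cases h : r ≤ c
  · rw [if_pos h, max_eq_left h]
  · rw [if_neg h, max_eq_right (le_of_not_ge h)]

-- last element of sorted g = running maximum of g
lemma pvLastSorted (x : String) (xs : List String) :
    PySem.List.pyGetD (PySem.List.sorted (x :: xs) (fun y => y) false) (-1) ""
      = (x :: xs).foldl (fun c r => if r ≤ c then c else r) x := by
  have hfold : (x :: xs).foldl (fun c r => if r ≤ c then c else r) x = xs.foldl max x := by
    simp only [List.foldl_cons]
    have hx : (if x ≤ x then x else x) = x := by simp
    rw [hx]
    apply PySem.List.foldl_congr_mem
    intro acc y _; exact pvStep_eq_max acc y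
  rw [hfold]
  have hmax : PySem.List.max? (x :: xs) (fun y => y) = some (xs.foldl max x) :=
    PySem.List.max?_id_cons x xs
  have hmem : xs.foldl max x ∈ (x :: xs) := PySem.List.max?_mem hmax
  have hisMax : ∀ y ∈ (x :: xs), y ≤ xs.foldl max x := by
    intro y hy; exact PySem.List.max?_isMax hmax y hy
  set s := PySem.List.sorted (x :: xs) (fun y => y) false with hs
  have hsne : s ≠ [] := by
    rw [hs, Ne, PySem.List.sorted_eq_nil_iff]; simp
  rw [PySem.List.pyGetD_neg_one s "" hsne]
  have hlen : 0 < s.length := List.length_pos_iff.mpr hsne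
  have hlast : s.getLast hsne = s[s.length - 1] := List.getLast_eq_getElem hsne
  have hmemS : ∀ y, y ∈ s ↔ y ∈ (x :: xs) := fun y => PySem.List.mem_sorted _ _ _ _
  -- the last element dominates every element of s
  have hdom : ∀ y ∈ s, y ≤ s.getLast hsne := by
    intro y hy
    obtain ⟨i, hi, rfl⟩ := List.mem_iff_getElem.mp hy
    rw [hlast]
    have := PySem.List.key_sorted_getElem_mono (xs := x :: xs) (key := fun y => y)
      (p := i) (q := s.length - 1) (by omega) (by rw [← hs]; omega)
    simpa [← hs] using this
  have h1 : s.getLast hsne ≤ xs.foldl max x :=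
    hisMax _ ((hmemS _).mp (List.getLast_mem hsne))
  have h2 : xs.foldl max x ≤ s.getLast hsne :=
    hdom _ ((hmemS _).mpr hmem)
  exact le_antisymm h1 h2

-- keys of both final dicts: the distinct kept names in first-insertion order
lemma pvKeysA (l : List String) :
    (l.foldl pvStepA PySem.Dict.empty).keys = PySem.Set.ofList (l.map pvKey) :=
  PySem.Dict.keys_foldl_insert_key l pvKey _ PySem.Dict.empty

lemma pvKeysB (l : List String) :
    (l.foldl pvStepB PySem.Dict.empty).keys = PySem.Set.ofList (l.map pvKey) :=
  PySem.Dict.keys_foldl_insert_key l pvKey _ PySem.Dict.empty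

lemma pvNodupA (l : List String) : (l.foldl pvStepA PySem.Dict.empty).keys.Nodup :=
  PySem.Dict.nodup_keys_foldl_insert_key l pvKey _ PySem.Dict.empty PySem.Dict.nodup_keys_empty

lemma pvNodupB (l : List String) : (l.foldl pvStepB PySem.Dict.empty).keys.Nodup :=
  PySem.Dict.nodup_keys_foldl_insert_key l pvKey _ PySem.Dict.empty PySem.Dict.nodup_keys_empty

-- ===== VERDICT (by name: the statement is the Claim_ definition above) =====
theorem filter_newest_spec : Claim_equal_filter_newest := by
  intro repos _
  unfold Spec_filter_newest filter_newest filter_newest_alt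
  rw [pvFoldA, pvFoldB, PySem.List.foldl_append_singleton_eq_map]
  set l := repos.filter pvKeep with hl
  set dA := l.foldl pvStepA PySem.Dict.empty with hdA
  set dB := l.foldl pvStepB PySem.Dict.empty with hdB
  rw [PySem.Dict.values_eq_map_keys dA (pvNodupA l) [],
      PySem.Dict.values_eq_map_keys dB (pvNodupB l) "", List.map_map]
  rw [pvKeysA, pvKeysB]
  apply List.map_congr_left
  intro k hk
  -- k is the name of some kept repo, so its group is nonempty
  have hkmem : k ∈ l.map pvKey := (PySem.Set.mem_ofList _ _).mp hk
  obtain ⟨r, hr, hrk⟩ := List.mem_map.mp hkmem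
  have hrg : r ∈ l.filter (fun r => pvKey r == k) :=
    List.mem_filter.mpr ⟨hr, by simp [hrk]⟩
  obtain ⟨x, xs, hg⟩ := List.exists_cons_of_ne_nil (List.ne_nil_of_mem hrg)
  have hA : dA.getD k [] = l.filter (fun r => pvKey r == k) := by
    rw [hdA, pvA_getD]; simp
  have hB : dB.get? k = some ((x :: xs).foldl (fun c r => if r ≤ c then c else r) x) := by
    rw [hdB, pvB_get? l k PySem.Dict.empty, PySem.Dict.get?_empty, hg]
    show pvOmax (some (if x ≤ x then x else x)) xs = _
    simp only [if_pos (le_refl x)]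
    rw [pvOmax_some]
    simp
  simp only [Function.comp_apply, hA, hg]
  rw [PySem.Dict.getD_eq_get?_getD, hB]
  exact pvLastSorted x xs
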